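-- pv_equiv track=rewrite | github.com/ITRoselloSignoris/University_CodingActivities | Python/Repaso/solucion.py | subsecuencia_mas_larga
-- ===== SOURCE A (Python) =====
-- def subsecuencia_mas_larga(v:list[int])->tuple[int,int]:
--     res:tuple[int,int] = (1,0)
--     for desde in range(len(v)):
--         for hasta in range(desde+1,len(v)):
--             if (v[hasta] - v[hasta-1]) != 1 and (v[hasta-1] - v[hasta]) != 1:
--                 break
--             longitud = hasta-desde + 1
--             if longitud > res[0]:
--                 res = (longitud, desde)
--     return res
-- ===== SOURCE B (Python) =====
-- def subsecuencia_mas_larga(v: list[int]) -> tuple[int, int]: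
--     # Single pass: track the start of the current +/-1-adjacent run and
--     # keep the (length, start) of the longest one, earliest start on ties.
--     res: tuple[int, int] = (1, 0)
--     start = 0
--     for i in range(1, len(v)):
--         d = v[i] - v[i - 1]
--         if d == 1 or d == -1:
--             longitud = i - start + 1
--             if longitud > res[0]:
--                 res = (longitud, start)
--         else:
--             start = i
--     return res
-- ===== Notes on version B (the rewrite author's own statement) =====
-- stated objective: faster
-- what changed: Replaces A's nested scan (restarting a run scan from every start index) with a single left-to-right pass that tracks the start of the current +/-1-adjacent run and keeps the longest (earliest on ties).
import Mathlib
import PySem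

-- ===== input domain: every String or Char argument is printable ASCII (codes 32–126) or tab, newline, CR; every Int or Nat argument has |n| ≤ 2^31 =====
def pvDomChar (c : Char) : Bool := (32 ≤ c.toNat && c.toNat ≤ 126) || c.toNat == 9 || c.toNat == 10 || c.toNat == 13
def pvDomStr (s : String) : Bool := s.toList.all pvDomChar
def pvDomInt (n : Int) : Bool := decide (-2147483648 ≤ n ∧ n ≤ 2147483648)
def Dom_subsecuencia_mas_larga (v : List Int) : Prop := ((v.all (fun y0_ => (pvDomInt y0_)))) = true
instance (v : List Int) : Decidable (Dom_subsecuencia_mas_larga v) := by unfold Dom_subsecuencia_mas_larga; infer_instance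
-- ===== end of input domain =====

-- B replaces A's quadratic nested scan by one linear pass tracking the start of the current ±1-adjacent run.

-- ===== PORT A =====
-- inner 'for hasta in range(desde+1, len(v))' with its break, carried as recursion on hasta
def pvInnerA (v : List Int) (desde hasta : Nat) (res : Int × Int) : Int × Int :=
  if hasta < v.length then
    if v.getD hasta 0 - v.getD (hasta - 1) 0 ≠ 1 ∧ v.getD (hasta - 1) 0 - v.getD hasta 0 ≠ 1 then
      res
    else
      let longitud : Int := (hasta : Int) - (desde : Int) + 1
      pvInnerA v desde (hasta + 1) (if longitud > res.1 then (longitud, (desde : Int)) else res)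
  else res
termination_by v.length - hasta

-- outer 'for desde in range(len(v))'
def pvOuterA (v : List Int) (desde : Nat) (res : Int × Int) : Int × Int :=
  if desde < v.length then pvOuterA v (desde + 1) (pvInnerA v desde (desde + 1) res)
  else res
termination_by v.length - desde

def subsecuencia_mas_larga (v : List Int) : Int × Int :=
  pvOuterA v 0 (1, 0)

-- ===== PORT B =====
-- single pass 'for i in range(1, len(v))' with state (res, start)
def pvLoopB (v : List Int) (i : Nat) (res : Int × Int) (start : Nat) : Int × Int :=
  if i < v.length then
    let d := v.getD i 0 - v.getD (i - 1) 0
    if d = 1 ∨ d = -1 then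
      let longitud : Int := (i : Int) - (start : Int) + 1
      pvLoopB v (i + 1) (if longitud > res.1 then (longitud, (start : Int)) else res) start
    else pvLoopB v (i + 1) res i
  else res
termination_by v.length - i

def subsecuencia_mas_larga_alt (v : List Int) : Int × Int :=
  pvLoopB v 1 (1, 0) 0

-- ===== PRECONDITION & SPEC =====
def Spec_subsecuencia_mas_larga (v : List Int) (out : Int × Int) : Prop := out = subsecuencia_mas_larga_alt v
instance (v : List Int) (out : Int × Int) : Decidable (Spec_subsecuencia_mas_larga v out) := by unfold Spec_subsecuencia_mas_larga; infer_instance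

-- ===== CLAIM (what is proved, stated in full; the proofs are below) =====
def Claim_equal_subsecuencia_mas_larga : Prop := ∀ (v : List Int), Dom_subsecuencia_mas_larga v → Spec_subsecuencia_mas_larga v (subsecuencia_mas_larga v)

-- ===== LEMMAS AND PROOFS =====

-- length of the maximal chain of ±1-adjacent steps starting at index h
def pvChain (v : List Int) (h : Nat) : Nat :=
  if h < v.length ∧ (v.getD h 0 - v.getD (h - 1) 0 = 1 ∨ v.getD (h - 1) 0 - v.getD h 0 = 1) then
    pvChain v (h + 1) + 1
  else 0
termination_by v.length - h

-- keep the better candidate (strictly longer wins)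
def pvUpd (res c : Int × Int) : Int × Int := if c.1 > res.1 then c else res

-- canonical form: one update per desde with the best length reachable from it
def pvG (v : List Int) (d : Nat) (res : Int × Int) : Int × Int :=
  if d < v.length then pvG v (d + 1) (pvUpd res ((pvChain v (d + 1) : Int) + 1, (d : Int)))
  else res
termination_by v.length - d

theorem pvUpd_fst_ge_left (res c : Int × Int) : res.1 ≤ (pvUpd res c).1 := by
  unfold pvUpd; split_ifs with h <;> omega

theorem pvUpd_fst_ge_right (res c : Int × Int) : c.1 ≤ (pvUpd res c).1 := by
  unfold pvUpd; split_ifs with h <;> omega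

theorem pvUpd_upd (res : Int × Int) (m M s : Int) (h : m ≤ M) :
    pvUpd (pvUpd res (m, s)) (M, s) = pvUpd res (M, s) := by
  unfold pvUpd; split_ifs <;> simp_all <;> omega

theorem pvInnerA_eq (v : List Int) (desde : Nat) :
    ∀ (hasta : Nat) (res : Int × Int), desde < hasta → (hasta : Int) - (desde : Int) ≤ res.1 →
      pvInnerA v desde hasta res
        = pvUpd res ((pvChain v hasta : Int) + ((hasta : Int) - (desde : Int)), (desde : Int)) := by
  intro hasta res hlt hres
  fun_induction pvInnerA v desde hasta res with
  | case1 hasta res hin hbrk =>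
      have hc : pvChain v hasta = 0 := by
        rw [pvChain]; split_ifs with h
        · exact absurd h (by tauto)
        · rfl
      rw [hc]
      unfold pvUpd
      rw [if_neg (by simp; omega)]
  | case2 hasta res hin hbrk longitud ih =>
      simp only [dite_eq_ite] at ih
      have hc : pvChain v hasta = pvChain v (hasta + 1) + 1 := by
        rw [pvChain]; split_ifs with h
        · rfl
        · exact absurd (by tauto : hasta < v.length ∧ _) h
      have hres2 : ((hasta + 1 : Nat) : Int) - (desde : Int)
          ≤ (if longitud > res.1 then (longitud, (desde : Int)) else res).1 := by
        split_ifs with h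
        · simp only [longitud]; push_cast; omega
        · push_cast; simp only [longitud] at h; omega
      rw [ih (by omega) hres2]
      have harg : (if longitud > res.1 then (longitud, (desde : Int)) else res)
          = pvUpd res (longitud, (desde : Int)) := rfl
      rw [harg]
      have hMM : ((pvChain v (hasta + 1) : Int) + (((hasta + 1 : Nat) : Int) - (desde : Int)) : Int)
          = (pvChain v hasta : Int) + ((hasta : Int) - (desde : Int)) := by
        rw [hc]; push_cast; ring
      rw [hMM]
      exact pvUpd_upd res longitud _ _ (by simp only [longitud]; rw [hc]; push_cast; omega)
  | case3 hasta res hout =>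
      have hc : pvChain v hasta = 0 := by
        rw [pvChain]; rw [if_neg (by tauto)]
      rw [hc]
      unfold pvUpd
      rw [if_neg (by simp; omega)]

theorem pvOuterA_eq (v : List Int) :
    ∀ (d : Nat) (res : Int × Int), (1 : Int) ≤ res.1 → pvOuterA v d res = pvG v d res := by
  intro d res h1
  fun_induction pvOuterA v d res with
  | case1 d res hin ih =>
      have hA := pvInnerA_eq v d (d + 1) res (by omega) (by push_cast; omega)
      have hprem : (1 : Int) ≤ (pvInnerA v d (d + 1) res).1 := by
        rw [hA]; exact le_trans h1 (pvUpd_fst_ge_left _ _)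
      rw [pvG, if_pos hin, ih hprem, hA]
      have hMM : ((pvChain v (d + 1) : Int) + (((d + 1 : Nat) : Int) - (d : Int)) : Int)
          = (pvChain v (d + 1) : Int) + 1 := by push_cast; ring
      rw [hMM]
  | case2 d res hout => rw [pvG, if_neg hout]

theorem pvLoopB_eq (v : List Int) :
    ∀ (i : Nat) (res : Int × Int) (start : Nat), start < i → (i : Int) - (start : Int) ≤ res.1 →
      pvLoopB v i res start
        = pvG v i (pvUpd res ((pvChain v i : Int) + ((i : Int) - (start : Int)), (start : Int))) := by
  intro i res start hsi hres
  fun_induction pvLoopB v i res start with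
  | case1 i res start hlt d hadj longitud ih =>
      simp only [dite_eq_ite] at ih
      have hc : pvChain v i = pvChain v (i + 1) + 1 := by
        have hadj' : v.getD i 0 - v.getD (i - 1) 0 = 1 ∨ v.getD (i - 1) 0 - v.getD i 0 = 1 := by
          simp only [d] at hadj; omega
        rw [pvChain]; split_ifs with h
        · rfl
        · exact absurd ⟨hlt, hadj'⟩ h
      have hres2 : ((i + 1 : Nat) : Int) - (start : Int)
          ≤ (if longitud > res.1 then (longitud, (start : Int)) else res).1 := by
        split_ifs with h
        · simp only [longitud]; push_cast; omega
        · push_cast; simp only [longitud] at h; omega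
      rw [ih (by omega) hres2]
      have harg : (if longitud > res.1 then (longitud, (start : Int)) else res)
          = pvUpd res (longitud, (start : Int)) := rfl
      rw [harg]
      have hMM : ((pvChain v (i + 1) : Int) + (((i + 1 : Nat) : Int) - (start : Int)) : Int)
          = (pvChain v i : Int) + ((i : Int) - (start : Int)) := by
        rw [hc]; push_cast; ring
      rw [hMM]
      rw [pvUpd_upd res longitud _ _ (by simp only [longitud]; rw [hc]; push_cast; omega)]
      conv_rhs => rw [pvG, if_pos hlt]
      -- the A-side candidate at index i is a no-op after the run-sized update
      have hbig : ((pvChain v (i + 1) : Int) + 1, (i : Int)).1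
          ≤ (pvUpd res ((pvChain v i : Int) + ((i : Int) - (start : Int)), (start : Int))).1 := by
        have h2 := pvUpd_fst_ge_right res ((pvChain v i : Int) + ((i : Int) - (start : Int)), (start : Int))
        simp only at h2 ⊢
        rw [hc] at h2 ⊢
        push_cast at h2 ⊢
        omega
      have hnoop : pvUpd (pvUpd res ((pvChain v i : Int) + ((i : Int) - (start : Int)), (start : Int)))
          ((pvChain v (i + 1) : Int) + 1, (i : Int))
          = pvUpd res ((pvChain v i : Int) + ((i : Int) - (start : Int)), (start : Int)) := by
        unfold pvUpd
        rw [if_neg (by simp only at hbig ⊢; unfold pvUpd at hbig; split_ifs at hbig ⊢ <;> omega)]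
      rw [hnoop]
  | case2 i res start hlt d hadj ih =>
      have hadj' : ¬(v.getD i 0 - v.getD (i - 1) 0 = 1 ∨ v.getD (i - 1) 0 - v.getD i 0 = 1) := by
        simp only [d] at hadj; omega
      have hc0 : pvChain v i = 0 := by
        rw [pvChain]; rw [if_neg (by tauto)]
      rw [ih (by omega) (by push_cast; omega)]
      have hl : pvUpd res ((pvChain v i : Int) + ((i : Int) - (start : Int)), (start : Int)) = res := by
        unfold pvUpd; rw [if_neg (by rw [hc0]; simp; omega)]
      rw [hl]
      conv_rhs => rw [pvG, if_pos hlt]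
      have hMM : ((pvChain v (i + 1) : Int) + (((i + 1 : Nat) : Int) - (i : Int)) : Int)
          = (pvChain v (i + 1) : Int) + 1 := by push_cast; ring
      rw [hMM]
  | case3 i res start hout =>
      have hc0 : pvChain v i = 0 := by
        rw [pvChain]; rw [if_neg (by tauto)]
      have hl : pvUpd res ((pvChain v i : Int) + ((i : Int) - (start : Int)), (start : Int)) = res := by
        unfold pvUpd; rw [if_neg (by rw [hc0]; simp; omega)]
      rw [hl, pvG, if_neg hout]

-- ===== VERDICT (by name: the statement is the Claim_ definition above) =====
theorem subsecuencia_mas_larga_spec : Claim_equal_subsecuencia_mas_larga := by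
  intro v _
  unfold Spec_subsecuencia_mas_larga subsecuencia_mas_larga subsecuencia_mas_larga_alt
  by_cases hn : v.length = 0
  · rw [pvOuterA, if_neg (by omega), pvLoopB, if_neg (by omega)]
  · rw [pvOuterA_eq v 0 (1, 0) (by norm_num)]
    rw [pvLoopB_eq v 1 (1, 0) 0 (by omega) (by norm_num)]
    rw [pvG, if_pos (by omega : (0:Nat) < v.length)]
    norm_num
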